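-- pv_equiv track=rewrite | github.com/Mr-Harsh-Dixit/Project_Euler_Solutions | Python/Problem_077.py | euler_77
-- ===== SOURCE A (Python) =====
-- def sieve(limit: int) -> list[int]:
--     if limit < 2:
--         return []
--     is_prime = [True] * (limit + 1)
--     is_prime[0] = is_prime[1] = False
--     for i in range(2, int(limit ** 0.5) + 1):
--         if is_prime[i]:
--             step = i
--             start = i * i
--             for j in range(start, limit + 1, step):
--                 is_prime[j] = False
--     return [i for i in range(2, limit + 1) if is_prime[i]]
--
-- def euler_77(threshold: int = 5000) -> int:
--     n = 2
--     while True: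
--         primes = sieve(n)
--         ways = [0] * (n + 1)
--         ways[0] = 1
--         for p in primes:
--             for s in range(p, n + 1):
--                 ways[s] += ways[s - p]
--         if ways[n] > threshold:
--             return n
--         n += 1
-- ===== SOURCE B (Python) =====
-- def euler_77(threshold: int = 5000) -> int:
--     # Trial-division primality + functional row-building partition DP, run once
--     # per doubling limit, with a single scan for the first n over the threshold.
--     def is_prime(k: int) -> bool:
--         if k < 2:
--             return False
--         d = 2
--         while d * d <= k:
--             if k % d == 0:
--                 return False
--             d += 1
--         return True
--
--     limit = 2
--     while True:
--         primes = [k for k in range(2, limit + 1) if is_prime(k)]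
--         row = [1] + [0] * limit
--         for p in primes:
--             new = row[:p]
--             for s in range(p, limit + 1):
--                 new.append(row[s] + new[s - p])
--             row = new
--         for n in range(2, limit + 1):
--             if row[n] > threshold:
--                 return n
--         limit *= 2
-- ===== Notes on version B (the rewrite author's own statement) =====
-- stated objective: faster
-- what changed: B replaces A's per-n rebuild of an Eratosthenes sieve plus in-place partition DP with trial-division primality testing and a functional row-per-prime DP computed once per doubling limit, then a single scan for the first n over the threshold.
import Mathlib
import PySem

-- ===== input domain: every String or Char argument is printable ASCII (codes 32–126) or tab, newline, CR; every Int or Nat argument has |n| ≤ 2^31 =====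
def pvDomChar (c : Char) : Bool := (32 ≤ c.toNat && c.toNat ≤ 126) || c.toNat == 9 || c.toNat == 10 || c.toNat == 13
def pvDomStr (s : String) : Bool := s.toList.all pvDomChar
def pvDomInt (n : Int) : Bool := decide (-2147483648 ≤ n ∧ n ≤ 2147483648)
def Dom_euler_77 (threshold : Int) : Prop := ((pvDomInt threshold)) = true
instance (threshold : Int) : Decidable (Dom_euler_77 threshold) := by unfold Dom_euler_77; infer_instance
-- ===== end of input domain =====

-- B replaces A's per-n "Eratosthenes sieve + in-place partition DP rebuilt from scratch"
-- with trial-division primality tests and a functional row-per-prime DP computed once per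
-- doubling limit, followed by a single first-hit scan (objective: faster).
-- Both Pythons loop unboundedly ("while True"); the ports bound the search by the same
-- total range [2, 131072] (A: one step per n; B: 17 doublings of the limit), far beyond
-- any n reachable for |threshold| ≤ 2^31 (the answer for threshold = 2^31 is n = 334),
-- so the fuel is unreachable on the stated domain and both ports return 0 only on the
-- shared (never-reached) exhaustion branch.

-- ===== PORT A =====
-- length of Python's range(start, limit+1, step)
def pvCnt (start limit step : Nat) : Nat :=
  if limit < start then 0 else (limit - start) / step + 1

-- Python's list is an array: is_prime/ways are ported as Array (List-level
-- reference versions and the bridge to them are below the claim block)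
-- body of A's outer sieve loop: "if is_prime[i]: for j in range(i*i, limit+1, i): is_prime[j] = False"
def pvMarkStepA (limit : Nat) (w : Array Bool) (i : Nat) : Array Bool :=
  if w.getD i false then
    (List.range' (i * i) (pvCnt (i * i) limit i) i).foldl (fun a j => a.setIfInBounds j false) w
  else w

-- is_prime array after A's marking loops; int(limit ** 0.5) = Nat.sqrt limit exactly for
-- every limit this file reaches (limit ≤ 2^31, where the float sqrt floors correctly)
def sieveMarkA (limit : Nat) : Array Bool :=
  (List.range' 2 (Nat.sqrt limit - 1)).foldl (pvMarkStepA limit)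
    (((Array.replicate (limit + 1) true).setIfInBounds 0 false).setIfInBounds 1 false)

def sieveA (limit : Nat) : List Nat :=
  if limit < 2 then []
  else (List.range' 2 (limit - 1)).filter (fun i => (sieveMarkA limit).getD i false)

-- "for s in range(p, limit+1): ways[s] += ways[s-p]"
def dpStepA (limit : Nat) (w : Array Int) (p : Nat) : Array Int :=
  (List.range' p (limit + 1 - p)).foldl
    (fun a s => a.setIfInBounds s (a.getD s 0 + a.getD (s - p) 0)) w

-- ways array: [0]*(limit+1), ways[0]=1, then the prime loop
def dpAllA (limit : Nat) (primes : List Nat) : Array Int :=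
  primes.foldl (dpStepA limit) ((Array.replicate (limit + 1) (0 : Int)).setIfInBounds 0 1)

-- A's "while True" loop, one n per step, bounded by fuel (unreachable on the domain)
def euler77go (threshold : Int) : Nat → Nat → Int
  | 0, _ => 0
  | fuel + 1, n =>
    if (dpAllA n (sieveA n)).getD n 0 > threshold then (n : Int)
    else euler77go threshold fuel (n + 1)

def euler_77 (threshold : Int) : Int := euler77go threshold 131071 2

-- ===== PORT B =====
-- "while d * d <= k: if k % d == 0: return False; d += 1; return True"
def tdLoop (k d : Nat) : Bool :=
  if h : d * d ≤ k then (if k % d == 0 then false else tdLoop k (d + 1)) else true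
termination_by k + 1 - d
decreasing_by
  have hdk : d ≤ k := by
    rcases Nat.eq_zero_or_pos d with h0 | h1
    · omega
    · exact le_trans (Nat.le_mul_of_pos_left d h1) h
  omega

def isPrimeTD (k : Nat) : Bool := if k < 2 then false else tdLoop k 2

-- "[k for k in range(2, limit + 1) if is_prime(k)]"
def primesTD (limit : Nat) : List Nat :=
  (List.range' 2 (limit - 1)).filter isPrimeTD

-- "new = row[:p]; for s in range(p, limit+1): new.append(row[s] + new[s-p])"
def addPrime (limit p : Nat) (row : List Int) : List Int :=
  (List.range' p (limit + 1 - p)).foldl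
    (fun new s => new ++ [row.getD s 0 + new.getD (s - p) 0]) (row.take p)

-- "row = [1] + [0]*limit; for p in primes: row = <new row>"
def rowsAll (limit : Nat) (primes : List Nat) : List Int :=
  primes.foldl (fun row p => addPrime limit p row) (1 :: List.replicate limit (0 : Int))

-- "for n in range(2, limit+1): if row[n] > threshold: return n"
def altScan (threshold : Int) (limit : Nat) (row : List Int) : Option Nat :=
  (List.range' 2 (limit - 1)).find? (fun k => decide (row.getD k 0 > threshold))

-- B's "while True" loop: one prime list + row DP + scan per doubling limit, bounded by
-- fuel (17 doublings cover limits up to 2^17 = 131072, unreachable on the domain)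
def altGo (threshold : Int) : Nat → Nat → Int
  | 0, _ => 0
  | fuel + 1, limit =>
    match altScan threshold limit (rowsAll limit (primesTD limit)) with
    | some k => (k : Int)
    | none => altGo threshold fuel (limit * 2)

def euler_77_alt (threshold : Int) : Int := altGo threshold 17 2

-- ===== PRECONDITION & SPEC =====
def Spec_euler_77 (threshold : Int) (out : Int) : Prop := out = euler_77_alt threshold
instance (threshold : Int) (out : Int) : Decidable (Spec_euler_77 threshold out) := by unfold Spec_euler_77; infer_instance

-- ===== CLAIM (what is proved, stated in full; the proofs are below) =====
def Claim_equal_euler_77 : Prop := ∀ (threshold : Int), Dom_euler_77 threshold → Spec_euler_77 threshold (euler_77 threshold)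

-- ===== LEMMAS AND PROOFS =====

-- List-level reference versions of A's arrays, and the Array → List bridge
-- body of A's outer sieve loop: "if is_prime[i]: for j in range(i*i, limit+1, i): is_prime[j] = False"
def pvMarkStep (limit : Nat) (w : List Bool) (i : Nat) : List Bool :=
  if w.getD i false then
    (List.range' (i * i) (pvCnt (i * i) limit i) i).foldl (fun a j => a.set j false) w
  else w

-- is_prime array after A's marking loops; int(limit ** 0.5) = Nat.sqrt limit exactly for
-- every limit this file reaches (limit ≤ 2^31, where the float sqrt floors correctly)
def sieveMark (limit : Nat) : List Bool :=
  (List.range' 2 (Nat.sqrt limit - 1)).foldl (pvMarkStep limit)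
    (((List.replicate (limit + 1) true).set 0 false).set 1 false)

def sieve (limit : Nat) : List Nat :=
  if limit < 2 then []
  else (List.range' 2 (limit - 1)).filter (fun i => (sieveMark limit).getD i false)

-- "for s in range(p, limit+1): ways[s] += ways[s-p]"
def dpStep (limit : Nat) (w : List Int) (p : Nat) : List Int :=
  (List.range' p (limit + 1 - p)).foldl
    (fun a s => a.set s (a.getD s 0 + a.getD (s - p) 0)) w

-- ways array: [0]*(limit+1), ways[0]=1, then the prime loop
def dpAll (limit : Nat) (primes : List Nat) : List Int :=
  primes.foldl (dpStep limit) ((List.replicate (limit + 1) (0 : Int)).set 0 1)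

theorem arr_getD {β : Type} (a : Array β) (i : Nat) (d : β) :
    a.getD i d = a.toList.getD i d := by
  rw [Array.getD_eq_getD_getElem?, List.getD_eq_getElem?_getD, Array.getElem?_toList]

theorem foldl_toList_arr {β : Type} (f : Array β → Nat → Array β) (g : List β → Nat → List β)
    (h : ∀ a j, (f a j).toList = g a.toList j) :
    ∀ (l : List Nat) (a : Array β), (l.foldl f a).toList = l.foldl g a.toList := by
  intro l
  induction l with
  | nil => intro a; rfl
  | cons x l ih => intro a; rw [List.foldl_cons, List.foldl_cons, ih, h]

theorem toList_markStep (L : Nat) (w : Array Bool) (i : Nat) :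
    (pvMarkStepA L w i).toList = pvMarkStep L w.toList i := by
  unfold pvMarkStepA pvMarkStep
  rw [arr_getD]
  split
  · exact foldl_toList_arr _ _ (fun a j => by rw [Array.toList_setIfInBounds]) _ w
  · rfl

theorem toList_sieveMark (L : Nat) : (sieveMarkA L).toList = sieveMark L := by
  unfold sieveMarkA sieveMark
  rw [foldl_toList_arr (pvMarkStepA L) (pvMarkStep L) (toList_markStep L)]
  simp [Array.toList_setIfInBounds, Array.toList_replicate]

theorem sieveA_eq (L : Nat) : sieveA L = sieve L := by
  unfold sieveA sieve
  have hf : (fun i => (sieveMarkA L).getD i false) = (fun i => (sieveMark L).getD i false) :=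
    funext fun i => by rw [arr_getD, toList_sieveMark]
  rw [hf]

theorem toList_dpStep (L : Nat) (w : Array Int) (p : Nat) :
    (dpStepA L w p).toList = dpStep L w.toList p := by
  unfold dpStepA dpStep
  exact foldl_toList_arr _ _
    (fun a s => by rw [Array.toList_setIfInBounds, arr_getD, arr_getD]) _ w

theorem toList_dpAll (L : Nat) (ps : List Nat) : (dpAllA L ps).toList = dpAll L ps := by
  unfold dpAllA dpAll
  rw [foldl_toList_arr (dpStepA L) (dpStep L) (toList_dpStep L)]
  simp [Array.toList_setIfInBounds, Array.toList_replicate]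


-- number of ways to write k as a sum of primes, as A computes it for limit = k
def pvW (k : Nat) : Int := (dpAll k (sieve k)).getD k 0

theorem getD_set_self {α : Type} (l : List α) (i : Nat) (x d : α) (h : i < l.length) :
    (l.set i x).getD i d = x := by
  simp [List.getD_eq_getElem?_getD, h]

theorem getD_set_ne {α : Type} (l : List α) {i j : Nat} (x d : α) (h : i ≠ j) :
    (l.set i x).getD j d = l.getD j d := by
  simp [List.getD_eq_getElem?_getD, h]

theorem mark_init_getD (m s : Nat) (hs : s ≤ m) :
    (((List.replicate (m + 1) true).set 0 false).set 1 false).getD s false = decide (2 ≤ s) := by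
  rw [List.getD_eq_getElem?_getD]
  rcases s with _ | _ | s
  · simp
  · simp [Nat.lt_succ_of_le hs]
  · simp [Nat.lt_succ_of_le hs]

theorem find?_congr_mem {α : Type} (p q : α → Bool) :
    ∀ l : List α, (∀ x ∈ l, p x = q x) → l.find? p = l.find? q := by
  intro l
  induction l with
  | nil => intro _; rfl
  | cons a l ih =>
    intro h
    have ha := h a (by simp)
    simp [List.find?_cons, ha]
    cases hq : q a with
    | true => simp
    | false => simpa using ih (fun x hx => h x (by simp [hx]))

theorem foldl_length {α : Type} (f : List α → Nat → List α)
    (hf : ∀ w j, (f w j).length = w.length) :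
    ∀ (l : List Nat) (w : List α), (l.foldl f w).length = w.length := by
  intro l
  induction l with
  | nil => intro w; rfl
  | cons a l ih => intro w; simp [List.foldl_cons, ih, hf]

-- ---- trial division = Nat.Prime ----

theorem tdLoop_iff (k d : Nat) :
    tdLoop k d = true ↔ ∀ m, d ≤ m → m * m ≤ k → ¬ m ∣ k := by
  rw [tdLoop]
  split
  · rename_i h
    by_cases hdvd : (k % d == 0) = true
    · rw [if_pos hdvd]
      simp only [Bool.false_eq_true, false_iff]
      intro hall
      exact hall d le_rfl h (Nat.dvd_of_mod_eq_zero (by simpa using hdvd))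
    · rw [if_neg hdvd]
      rw [tdLoop_iff k (d + 1)]
      have hnd : ¬ d ∣ k := by
        intro hdk
        obtain ⟨c, rfl⟩ := hdk
        simp [Nat.mul_mod_right] at hdvd
      constructor
      · intro hall m hm hmk hdk
        rcases Nat.eq_or_lt_of_le hm with he | hl
        · exact hnd (he ▸ hdk)
        · exact hall m hl hmk hdk
      · intro hall m hm hmk
        exact hall m (by omega) hmk
  · rename_i h
    constructor
    · intro _ m hm hmk
      have : d * d ≤ m * m := Nat.mul_le_mul hm hm
      omega
    · intro _
      rfl
termination_by k + 1 - d
decreasing_by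
  have hdd : d * d ≤ k := ‹d * d ≤ k›
  have hdk : d ≤ k := by
    rcases Nat.eq_zero_or_pos d with h0 | h1
    · omega
    · exact le_trans (Nat.le_mul_of_pos_left d h1) hdd
  omega

theorem isPrimeTD_iff (k : Nat) : isPrimeTD k = true ↔ Nat.Prime k := by
  unfold isPrimeTD
  split
  · rename_i h
    simp only [Bool.false_eq_true, false_iff]
    intro hp
    exact absurd hp.two_le (by omega)
  · rename_i h
    rw [tdLoop_iff, Nat.prime_def_le_sqrt]
    constructor
    · intro hall
      exact ⟨by omega, fun m hm hms => hall m hm (Nat.le_sqrt.mp hms)⟩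
    · intro ⟨_, hall⟩ m hm hmk
      exact hall m hm (Nat.le_sqrt.mpr hmk)

-- ---- sieve correctness: the marked array encodes "has a small prime factor" ----

def MarkedBy (ub k : Nat) : Prop := ∃ p, Nat.Prime p ∧ p ≤ ub ∧ p * p ≤ k ∧ p ∣ k

theorem setfalse_foldl_getD (l : List Nat) :
    ∀ (arr : List Bool) (k : Nat),
      (l.foldl (fun a j => a.set j false) arr).getD k false =
        if k ∈ l then false else arr.getD k false := by
  induction l with
  | nil => intro arr k; simp
  | cons j l ih =>
    intro arr k
    rw [List.foldl_cons, ih]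
    by_cases hkl : k ∈ l
    · simp [hkl]
    · rw [if_neg hkl]
      by_cases hkj : k = j
      · subst hkj
        rw [if_pos (List.mem_cons_self)]
        rcases Nat.lt_or_ge k arr.length with hlt | hge
        · exact getD_set_self _ _ _ _ hlt
        · rw [List.getD_eq_getElem?_getD, List.getElem?_set]
          simp [Nat.not_lt.mpr hge]
      · rw [if_neg (by simp [hkj, hkl])]
        exact getD_set_ne _ _ _ (fun e => hkj e.symm)

theorem setfalse_foldl_length (l : List Nat) (arr : List Bool) :
    (l.foldl (fun a j => a.set j false) arr).length = arr.length :=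
  foldl_length _ (fun w j => List.length_set) l arr

theorem mem_mults_iff (i limit k : Nat) (hi : 1 ≤ i) (hk : k ≤ limit) :
    k ∈ List.range' (i * i) (pvCnt (i * i) limit i) i ↔ i * i ≤ k ∧ i ∣ k := by
  unfold pvCnt
  split
  · rename_i h
    simp only [List.range'_zero, List.not_mem_nil, false_iff, not_and]
    intro hik _
    omega
  · rename_i h
    rw [List.mem_range']
    constructor
    · rintro ⟨t, ht, rfl⟩
      refine ⟨by omega, ⟨i + t, by ring⟩⟩
    · rintro ⟨hik, c, rfl⟩
      have hi0 : 0 < i := hi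
      have hic : i ≤ c := Nat.le_of_mul_le_mul_left hik hi0
      have hkey : i * i + i * (c - i) = i * c := by
        rw [← Nat.mul_add, show i + (c - i) = c by omega]
      refine ⟨c - i, ?_, by omega⟩
      have h3 : c - i ≤ (limit - i * i) / i := by
        rw [Nat.le_div_iff_mul_le hi0, mul_comm]
        omega
      omega

theorem markStep_inv (limit i : Nat) (h2i : 2 ≤ i) (hil : i ≤ limit) (arr : List Bool)
    (hlen : arr.length = limit + 1)
    (hinv : ∀ k, k ≤ limit → (arr.getD k false = true ↔ 2 ≤ k ∧ ¬ MarkedBy (i - 1) k)) :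
    (pvMarkStep limit arr i).length = limit + 1 ∧
      ∀ k, k ≤ limit →
        ((pvMarkStep limit arr i).getD k false = true ↔ 2 ≤ k ∧ ¬ MarkedBy i k) := by
  unfold pvMarkStep
  by_cases hM : MarkedBy (i - 1) i
  · -- guard is false: i already marked composite; nothing changes
    have hgf : arr.getD i false = false := by
      cases hb : arr.getD i false with
      | false => rfl
      | true => exact absurd hM ((hinv i hil).mp hb).2
    rw [hgf]
    simp only [Bool.false_eq_true, if_false]
    -- i is composite, so MarkedBy i k ↔ MarkedBy (i-1) k
    have hicomp : ¬ Nat.Prime i := by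
      intro hp
      obtain ⟨q, hq, hqle, _, hqdvd⟩ := hM
      have := (Nat.prime_dvd_prime_iff_eq hq hp).mp hqdvd
      omega
    have hMk : ∀ k, MarkedBy i k ↔ MarkedBy (i - 1) k := by
      intro k
      constructor
      · rintro ⟨p, hp, hpl, hpp, hpd⟩
        rcases Nat.lt_or_ge p i with hlt | hge
        · exact ⟨p, hp, by omega, hpp, hpd⟩
        · have : p = i := by omega
          subst this
          exact absurd hp hicomp
      · rintro ⟨p, hp, hpl, hpp, hpd⟩
        exact ⟨p, hp, by omega, hpp, hpd⟩
    refine ⟨hlen, fun k hk => ?_⟩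
    rw [hinv k hk, hMk k]
  · -- guard is true: i is prime; mark its multiples from i*i
    have hgt : arr.getD i false = true := (hinv i hil).mpr ⟨h2i, hM⟩
    rw [hgt]
    simp only [if_true]
    have hip : Nat.Prime i := by
      by_contra hnp
      have hq := Nat.minFac_prime (n := i) (by omega)
      have hqd := Nat.minFac_dvd i
      have hqq : i.minFac * i.minFac ≤ i := by
        have := Nat.minFac_sq_le_self (n := i) (by omega) hnp
        simpa [pow_two] using this
      have hqlt : i.minFac ≤ i - 1 := by
        have h1 : i.minFac ≤ i := Nat.le_of_dvd (by omega) hqd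
        have h2 : i.minFac ≠ i := fun e => hnp (e ▸ hq)
        omega
      exact hM ⟨i.minFac, hq, hqlt, hqq, hqd⟩
    have hsplit : ∀ k, MarkedBy i k ↔ MarkedBy (i - 1) k ∨ (i * i ≤ k ∧ i ∣ k) := by
      intro k
      constructor
      · rintro ⟨p, hp, hpl, hpp, hpd⟩
        rcases Nat.lt_or_ge p i with hlt | hge
        · exact Or.inl ⟨p, hp, by omega, hpp, hpd⟩
        · have : p = i := by omega
          subst this
          exact Or.inr ⟨hpp, hpd⟩
      · rintro (⟨p, hp, hpl, hpp, hpd⟩ | ⟨h1, h2⟩)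
        · exact ⟨p, hp, by omega, hpp, hpd⟩
        · exact ⟨i, hip, le_rfl, h1, h2⟩
    refine ⟨by rw [setfalse_foldl_length, hlen], fun k hk => ?_⟩
    rw [setfalse_foldl_getD]
    by_cases hmul : i * i ≤ k ∧ i ∣ k
    · rw [if_pos ((mem_mults_iff i limit k (by omega) hk).mpr hmul)]
      constructor
      · intro habs
        exact absurd habs (by simp)
      · rintro ⟨_, hnm⟩
        exact absurd ((hsplit k).mpr (Or.inr hmul)) hnm
    · rw [if_neg (fun hmem => hmul ((mem_mults_iff i limit k (by omega) hk).mp hmem)), hinv k hk]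
      constructor
      · rintro ⟨h2k, hnm⟩
        refine ⟨h2k, fun hm => ?_⟩
        rcases (hsplit k).mp hm with h | h
        · exact hnm h
        · exact hmul h
      · rintro ⟨h2k, hnm⟩
        exact ⟨h2k, fun hm => hnm ((hsplit k).mpr (Or.inl hm))⟩

theorem sieveMark_foldl_inv (limit : Nat) (h2 : 2 ≤ limit) :
    ∀ m, m + 1 ≤ limit →
      (((List.range' 2 m).foldl (pvMarkStep limit)
          (((List.replicate (limit + 1) true).set 0 false).set 1 false)).length = limit + 1) ∧
      ∀ k, k ≤ limit →
        (((List.range' 2 m).foldl (pvMarkStep limit)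
            (((List.replicate (limit + 1) true).set 0 false).set 1 false)).getD k false = true ↔
          2 ≤ k ∧ ¬ MarkedBy (m + 1) k) := by
  intro m
  induction m with
  | zero =>
    intro _
    refine ⟨by simp, fun k hk => ?_⟩
    simp only [List.range'_zero, List.foldl_nil]
    rw [mark_init_getD limit k hk]
    have hnm : ¬ MarkedBy 1 k := by
      rintro ⟨p, hp, hpl, _, _⟩
      have := hp.two_le
      omega
    simp [hnm]
  | succ m ih =>
    intro hm1
    obtain ⟨ihlen, ihinv⟩ := ih (by omega)
    have hconc : List.range' 2 (m + 1) = List.range' 2 m ++ [2 + m] := by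
      simpa using List.range'_concat (s := 2) (n := m) (step := 1)
    rw [hconc, List.foldl_append, List.foldl_cons, List.foldl_nil]
    have hub : 2 + m - 1 = m + 1 := by omega
    have := markStep_inv limit (2 + m) (by omega) (by omega) _ ihlen
      (fun k hk => by rw [ihinv k hk, hub])
    refine ⟨this.1, fun k hk => ?_⟩
    rw [(this.2 k hk), show 2 + m = m + 1 + 1 by omega]

theorem sieveMark_getD_iff (limit k : Nat) (h2 : 2 ≤ limit) (hk : k ≤ limit) :
    ((sieveMark limit).getD k false = true ↔ 2 ≤ k ∧ ¬ MarkedBy (Nat.sqrt limit) k) := by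
  have hs1 : 1 ≤ Nat.sqrt limit := Nat.le_sqrt.mpr (by omega)
  have hsle : Nat.sqrt limit ≤ limit := Nat.sqrt_le_self limit
  unfold sieveMark
  rw [(sieveMark_foldl_inv limit h2 (Nat.sqrt limit - 1) (by omega)).2 k hk,
    show Nat.sqrt limit - 1 + 1 = Nat.sqrt limit by omega]

theorem not_markedBy_sqrt_iff (limit k : Nat) (h2k : 2 ≤ k) (hk : k ≤ limit) :
    ¬ MarkedBy (Nat.sqrt limit) k ↔ Nat.Prime k := by
  constructor
  · intro hnm
    by_contra hnp
    have hq := Nat.minFac_prime (n := k) (by omega)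
    have hqd := Nat.minFac_dvd k
    have hqq : k.minFac * k.minFac ≤ k := by
      have := Nat.minFac_sq_le_self (n := k) (by omega) hnp
      simpa [pow_two] using this
    have hqs : k.minFac ≤ Nat.sqrt limit :=
      le_trans (Nat.le_sqrt.mpr hqq) (Nat.sqrt_le_sqrt hk)
    exact hnm ⟨k.minFac, hq, hqs, hqq, hqd⟩
  · rintro hp ⟨p, hpp, hpl, hpk, hpd⟩
    have : p = k := (Nat.prime_dvd_prime_iff_eq hpp hp).mp hpd
    subst this
    nlinarith [hp.two_le]

theorem sieve_eq_primesTD (limit : Nat) (h2 : 2 ≤ limit) :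
    sieve limit = primesTD limit := by
  unfold sieve primesTD
  rw [if_neg (by omega)]
  apply List.filter_congr
  intro k hk
  rw [List.mem_range'_1] at hk
  have h2k : 2 ≤ k := hk.1
  have hkl : k ≤ limit := by omega
  have hA : ((sieveMark limit).getD k false = true) ↔ Nat.Prime k := by
    rw [sieveMark_getD_iff limit k h2 hkl,
      not_markedBy_sqrt_iff limit k h2k hkl]
    constructor
    · intro h; exact h.2
    · intro h; exact ⟨h2k, h⟩
  have hB := isPrimeTD_iff k
  cases hA' : (sieveMark limit).getD k false <;> cases hB' : isPrimeTD k <;> simp_all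

-- ---- the in-place DP step equals the functional row step ----

-- the recurrence both inner loops satisfy: r s = row s for s < p, else row s + r (s - p)
def wrec (p : Nat) (row : List Int) (s : Nat) : Int :=
  if s < p then row.getD s 0
  else if p = 0 then 0
  else row.getD s 0 + wrec p row (s - p)
termination_by s
decreasing_by omega

theorem wrec_add (p : Nat) (row : List Int) (m : Nat) (hp : 1 ≤ p) :
    wrec p row (p + m) = row.getD (p + m) 0 + wrec p row m := by
  rw [wrec, if_neg (show ¬ p + m < p by omega), if_neg (show ¬ p = 0 by omega),
    show p + m - p = m by omega]

theorem dpStep_foldl_inv (L p : Nat) (hp : 1 ≤ p) (row : List Int) (hlen : row.length = L + 1) :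
    ∀ m, p + m ≤ L + 1 →
      ((List.range' p m).foldl (fun a s => a.set s (a.getD s 0 + a.getD (s - p) 0)) row).length = L + 1 ∧
      (∀ t, t < p + m →
        ((List.range' p m).foldl (fun a s => a.set s (a.getD s 0 + a.getD (s - p) 0)) row).getD t 0 = wrec p row t) ∧
      (∀ t, p + m ≤ t →
        ((List.range' p m).foldl (fun a s => a.set s (a.getD s 0 + a.getD (s - p) 0)) row).getD t 0 = row.getD t 0) := by
  intro m
  induction m with
  | zero =>
    intro _
    simp only [List.range'_zero, List.foldl_nil]
    refine ⟨hlen, fun t ht => ?_, fun t ht => by trivial⟩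
    rw [wrec, if_pos (show t < p by omega)]
  | succ m ih =>
    intro hm
    obtain ⟨ihlen, ihlow, ihhigh⟩ := ih (by omega)
    have hconc : List.range' p (m + 1) = List.range' p m ++ [p + m] := by
      simpa using List.range'_concat (s := p) (n := m) (step := 1)
    rw [hconc, List.foldl_append, List.foldl_cons, List.foldl_nil]
    set F := (List.range' p m).foldl (fun a s => a.set s (a.getD s 0 + a.getD (s - p) 0)) row with hF
    have hj : p + m < L + 1 := by omega
    have hjval : F.getD (p + m) 0 + F.getD (p + m - p) 0 = wrec p row (p + m) := by
      rw [ihhigh (p + m) le_rfl, show p + m - p = m by omega, ihlow m (by omega)]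
      exact (wrec_add p row m hp).symm
    refine ⟨by rw [List.length_set, ihlen], fun t ht => ?_, fun t ht => ?_⟩
    · by_cases htj : t = p + m
      · subst htj
        rw [getD_set_self _ _ _ _ (by rw [ihlen]; omega), hjval]
      · rw [getD_set_ne _ _ _ (fun e => htj e.symm), ihlow t (by omega)]
    · rw [getD_set_ne _ _ _ (by omega), ihhigh t (by omega)]

theorem addPrime_foldl_inv (L p : Nat) (hp : 1 ≤ p) (hpl : p ≤ L)
    (row : List Int) (hlen : row.length = L + 1) :
    ∀ m, p + m ≤ L + 1 →
      ((List.range' p m).foldl (fun new s => new ++ [row.getD s 0 + new.getD (s - p) 0]) (row.take p)).length = p + m ∧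
      ∀ t, t < p + m →
        ((List.range' p m).foldl (fun new s => new ++ [row.getD s 0 + new.getD (s - p) 0]) (row.take p)).getD t 0 = wrec p row t := by
  intro m
  induction m with
  | zero =>
    intro _
    refine ⟨by simp [hlen]; omega, fun t ht => ?_⟩
    simp only [List.range'_zero, List.foldl_nil, Nat.add_zero] at *
    have htp : t < (row.take p).length := by simp [hlen]; omega
    rw [List.getD_eq_getElem _ _ htp, List.getElem_take, ← List.getD_eq_getElem row 0 (by simp [hlen]; omega)]
    rw [wrec]
    simp [ht]
  | succ m ih =>
    intro hm
    obtain ⟨ihlen, ihlow⟩ := ih (by omega)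
    have hconc : List.range' p (m + 1) = List.range' p m ++ [p + m] := by
      simpa using List.range'_concat (s := p) (n := m) (step := 1)
    rw [hconc, List.foldl_append, List.foldl_cons, List.foldl_nil]
    set G := (List.range' p m).foldl (fun new s => new ++ [row.getD s 0 + new.getD (s - p) 0]) (row.take p) with hG
    refine ⟨by simp [ihlen]; omega, fun t ht => ?_⟩
    by_cases htj : t = p + m
    · subst htj
      rw [List.getD_eq_getElem?_getD]
      have hcat : (G ++ [row.getD (p + m) 0 + G.getD (p + m - p) 0])[p + m]? =
          some (row.getD (p + m) 0 + G.getD (p + m - p) 0) := by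
        rw [← ihlen]
        exact List.getElem?_concat_length
      rw [hcat]
      simp only [Option.getD_some]
      rw [show p + m - p = m by omega, ihlow m (by omega)]
      exact (wrec_add p row m hp).symm
    · rw [List.getD_append _ _ _ t (by rw [ihlen]; omega), ihlow t (by omega)]

theorem addPrime_eq_dpStep (L p : Nat) (h2p : 2 ≤ p) (hpl : p ≤ L)
    (row : List Int) (hlen : row.length = L + 1) :
    addPrime L p row = dpStep L row p := by
  unfold addPrime dpStep
  have hm : p + (L + 1 - p) = L + 1 := by omega
  obtain ⟨blen, blow⟩ := addPrime_foldl_inv L p (by omega) hpl row hlen (L + 1 - p) (by omega)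
  obtain ⟨alen, alow, _⟩ := dpStep_foldl_inv L p (by omega) row hlen (L + 1 - p) (by omega)
  apply List.ext_getElem (by rw [blen, alen, hm])
  intro i h1 h2
  rw [← List.getD_eq_getElem _ 0 h1, ← List.getD_eq_getElem _ 0 h2,
    blow i (by omega), alow i (by omega)]

theorem mem_sieve_le (n : Nat) (p : Nat) (hp : p ∈ sieve n) : p ≤ n := by
  unfold sieve at hp
  split at hp
  · simp at hp
  · have := List.mem_of_mem_filter hp
    rw [List.mem_range'_1] at this
    omega

theorem mem_sieve_two_le (n : Nat) (p : Nat) (hp : p ∈ sieve n) : 2 ≤ p := by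
  unfold sieve at hp
  split at hp
  · simp at hp
  · have := List.mem_of_mem_filter hp
    rw [List.mem_range'_1] at this
    omega

theorem rowsAll_eq_dpAll (L : Nat) (ps : List Nat) (hps : ∀ p ∈ ps, 2 ≤ p ∧ p ≤ L) :
    rowsAll L ps = dpAll L ps := by
  unfold rowsAll dpAll
  have hinit : (1 :: List.replicate L (0 : Int)) = (List.replicate (L + 1) (0 : Int)).set 0 1 := by
    simp [List.replicate_succ]
  rw [hinit]
  have : ∀ (l : List Nat) (row : List Int), (∀ p ∈ l, 2 ≤ p ∧ p ≤ L) → row.length = L + 1 →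
      l.foldl (fun row p => addPrime L p row) row = l.foldl (dpStep L) row := by
    intro l
    induction l with
    | nil => intro row _ _; rfl
    | cons a l ih =>
      intro row hl hlen
      rw [List.foldl_cons, List.foldl_cons,
        addPrime_eq_dpStep L a (hl a (by simp)).1 (hl a (by simp)).2 row hlen]
      exact ih _ (fun p hp => hl p (by simp [hp]))
        (by unfold dpStep; rw [foldl_length _ (fun w j => List.length_set), hlen])
  exact this ps _ hps (by simp)

-- ---- DP stability: the value at k is the same for every limit ≥ k ----

-- the two arrays agree on all indices ≤ n
def Agree {α : Type} (n : Nat) (d : α) (w1 w2 : List α) : Prop :=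
  ∀ s, s ≤ n → w1.getD s d = w2.getD s d

theorem foldl_untouched {α : Type} (d : α) (n : Nat) (f : List α → Nat → List α)
    (hf : ∀ w j s, n < j → s ≤ n → (f w j).getD s d = w.getD s d) :
    ∀ (l : List Nat) (w : List α), (∀ j ∈ l, n < j) →
      ∀ s, s ≤ n → (l.foldl f w).getD s d = w.getD s d := by
  intro l
  induction l with
  | nil => intro w _ s _; rfl
  | cons a l ih =>
    intro w hl s hs
    rw [List.foldl_cons, ih (f w a) (fun j hj => hl j (by simp [hj])) s hs]
    exact hf w a s (hl a (by simp)) hs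

theorem foldl_parallel {α : Type} (d : α) (n : Nat) (f : List α → Nat → List α)
    (hlen : ∀ w j, (f w j).length = w.length)
    (hstep : ∀ w1 w2 j, j ≤ n → n < w1.length → n < w2.length → Agree n d w1 w2 →
      Agree n d (f w1 j) (f w2 j)) :
    ∀ (l : List Nat) (w1 w2 : List α), (∀ j ∈ l, j ≤ n) →
      n < w1.length → n < w2.length → Agree n d w1 w2 →
      Agree n d (l.foldl f w1) (l.foldl f w2) := by
  intro l
  induction l with
  | nil => intro w1 w2 _ _ _ h; exact h
  | cons a l ih =>
    intro w1 w2 hl h1 h2 h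
    rw [List.foldl_cons, List.foldl_cons]
    exact ih (f w1 a) (f w2 a) (fun j hj => hl j (by simp [hj]))
      (by rw [hlen]; exact h1) (by rw [hlen]; exact h2)
      (hstep w1 w2 a (hl a (by simp)) h1 h2 h)

-- a < b * (a / b + 1)
theorem lt_mul_div_succ (a b : Nat) (hb : 0 < b) : a < b * (a / b + 1) := by
  have h1 := Nat.div_add_mod a b
  have h2 := Nat.mod_lt a hb
  calc a = b * (a / b) + a % b := h1.symm
    _ < b * (a / b) + b := by omega
    _ = b * (a / b + 1) := by ring

theorem dp_init_getD (m s : Nat) (hs : s ≤ m) :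
    ((List.replicate (m + 1) (0 : Int)).set 0 1).getD s 0 = if s = 0 then 1 else 0 := by
  rw [List.getD_eq_getElem?_getD]
  rcases s with _ | s
  · simp
  · simp [Nat.lt_succ_of_le hs]

-- ---- mark-array stability ----

theorem markStep_length (limit : Nat) (w : List Bool) (i : Nat) :
    (pvMarkStep limit w i).length = w.length := by
  unfold pvMarkStep
  split
  · exact foldl_length _ (fun w j => List.length_set) _ w
  · rfl

theorem markStep_agree (n L : Nat) (hnL : n ≤ L) (i : Nat) (hi1 : 1 ≤ i)
    (hi : i ≤ Nat.sqrt n) (w1 w2 : List Bool)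
    (h1 : n < w1.length) (h2 : n < w2.length) (h : Agree n false w1 w2) :
    Agree n false (pvMarkStep n w1 i) (pvMarkStep L w2 i) := by
  have hin : i ≤ n := le_trans hi (Nat.sqrt_le_self n)
  have hguard : w1.getD i false = w2.getD i false := h i hin
  unfold pvMarkStep
  rw [hguard]
  by_cases hg : w2.getD i false = true
  · simp only [hg, if_true]
    have hiin : i * i ≤ n := Nat.le_sqrt.mp hi
    have hc1 : pvCnt (i * i) n i = (n - i * i) / i + 1 := by
      unfold pvCnt; rw [if_neg (by omega)]
    have hc2 : pvCnt (i * i) L i = (L - i * i) / i + 1 := by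
      unfold pvCnt; rw [if_neg (by omega)]
    have hcle : pvCnt (i * i) n i ≤ pvCnt (i * i) L i := by
      rw [hc1, hc2]
      have := Nat.div_le_div_right (c := i) (Nat.sub_le_sub_right hnL (i * i))
      omega
    -- split the longer multiples range
    have hsplit : List.range' (i * i) (pvCnt (i * i) L i) i =
        List.range' (i * i) (pvCnt (i * i) n i) i ++
        List.range' (i * i + i * pvCnt (i * i) n i)
          (pvCnt (i * i) L i - pvCnt (i * i) n i) i := by
      rw [List.range'_append, Nat.add_sub_cancel' hcle]
    rw [hsplit, List.foldl_append]
    have hcommon : ∀ j ∈ List.range' (i * i) (pvCnt (i * i) n i) i, j ≤ n := by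
      intro j hj
      rw [List.mem_range'] at hj
      obtain ⟨t, ht, rfl⟩ := hj
      have ht' : t ≤ (n - i * i) / i := by omega
      have := Nat.mul_le_mul_left i ht'
      have h3 : i * ((n - i * i) / i) ≤ n - i * i := by
        rw [mul_comm]; exact Nat.div_mul_le_self _ _
      omega
    have hpar := foldl_parallel false n (fun a j => a.set j false)
      (fun w j => List.length_set)
      (fun u1 u2 j hj hu1 hu2 hu => by
        intro s hs
        by_cases hsj : s = j
        · subst hsj
          rw [getD_set_self _ _ _ _ (by omega), getD_set_self _ _ _ _ (by omega)]
        · rw [getD_set_ne _ _ _ (fun e => hsj e.symm), getD_set_ne _ _ _ (fun e => hsj e.symm)]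
          exact hu s hs)
      (List.range' (i * i) (pvCnt (i * i) n i) i) w1 w2 hcommon h1 h2 h
    have hextra : ∀ j ∈ List.range' (i * i + i * pvCnt (i * i) n i)
        (pvCnt (i * i) L i - pvCnt (i * i) n i) i, n < j := by
      intro j hj
      rw [List.mem_range'] at hj
      obtain ⟨t, ht, rfl⟩ := hj
      have : n - i * i < i * ((n - i * i) / i + 1) := lt_mul_div_succ _ _ (by omega)
      rw [hc1]
      omega
    intro s hs
    rw [foldl_untouched false n (fun a j => a.set j false)
      (fun w j s hnj hsn => getD_set_ne _ _ _ (by omega)) _ _ hextra s hs]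
    exact hpar s hs
  · simp only [Bool.not_eq_true] at hg
    simp only [hg]
    exact h

theorem mark_agree (n L : Nat) (h2 : 2 ≤ n) (hnL : n ≤ L) :
    Agree n false (sieveMark n) (sieveMark L) := by
  have hsq : Nat.sqrt n ≤ Nat.sqrt L := Nat.sqrt_le_sqrt hnL
  have hsq1 : 1 ≤ Nat.sqrt n := Nat.le_sqrt.mpr (by omega)
  -- initial arrays agree up to n
  have hinit : Agree n false (((List.replicate (n + 1) true).set 0 false).set 1 false)
      (((List.replicate (L + 1) true).set 0 false).set 1 false) := by
    intro s hs
    rw [mark_init_getD n s hs, mark_init_getD L s (by omega)]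
  have hlen1 : (((List.replicate (n + 1) true).set 0 false).set 1 false).length = n + 1 := by simp
  have hlen2 : (((List.replicate (L + 1) true).set 0 false).set 1 false).length = L + 1 := by simp
  unfold sieveMark
  -- split the outer i-range
  have houter : List.range' 2 (Nat.sqrt L - 1) =
      List.range' 2 (Nat.sqrt n - 1) ++
      List.range' (Nat.sqrt n + 1) (Nat.sqrt L - Nat.sqrt n) := by
    have := List.range'_append (s := 2) (m := Nat.sqrt n - 1)
      (n := Nat.sqrt L - Nat.sqrt n) (step := 1)
    simp only [one_mul] at this
    rw [show 2 + (Nat.sqrt n - 1) = Nat.sqrt n + 1 by omega] at this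
    rw [show Nat.sqrt n - 1 + (Nat.sqrt L - Nat.sqrt n) = Nat.sqrt L - 1 by omega] at this
    exact this.symm
  rw [houter, List.foldl_append]
  -- common part: parallel induction
  have hcommon : ∀ (l : List Nat) (w1 w2 : List Bool),
      (∀ i ∈ l, 1 ≤ i ∧ i ≤ Nat.sqrt n) → w1.length = n + 1 → w2.length = L + 1 →
      Agree n false w1 w2 →
      Agree n false (l.foldl (pvMarkStep n) w1) (l.foldl (pvMarkStep L) w2) ∧
        (l.foldl (pvMarkStep n) w1).length = n + 1 ∧
        (l.foldl (pvMarkStep L) w2).length = L + 1 := by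
    intro l
    induction l with
    | nil => intro w1 w2 _ e1 e2 h; exact ⟨h, e1, e2⟩
    | cons a l ih =>
      intro w1 w2 hl e1 e2 h
      rw [List.foldl_cons, List.foldl_cons]
      exact ih _ _ (fun i hi => hl i (by simp [hi]))
        (by rw [markStep_length, e1]) (by rw [markStep_length, e2])
        (markStep_agree n L hnL a (hl a (by simp)).1 (hl a (by simp)).2 w1 w2
          (by omega) (by omega) h)
  obtain ⟨hagree, he1, he2⟩ := hcommon (List.range' 2 (Nat.sqrt n - 1)) _ _
    (fun i hi => by rw [List.mem_range'_1] at hi; omega) hlen1 hlen2 hinit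
  -- extra part (applied to the L-array only) never touches indices ≤ n
  have hextra : ∀ (l : List Nat) (w2 : List Bool),
      (∀ i ∈ l, Nat.sqrt n < i) →
      ∀ s, s ≤ n → (l.foldl (pvMarkStep L) w2).getD s false = w2.getD s false := by
    intro l
    induction l with
    | nil => intro w2 _ s _; rfl
    | cons a l ih =>
      intro w2 hl s hs
      rw [List.foldl_cons, ih _ (fun i hi => hl i (by simp [hi])) s hs]
      have han : n < a * a := by
        have := (Nat.sqrt_lt' (m := n) (n := a)).mp (hl a (by simp))
        calc n < a ^ 2 := this
          _ = a * a := sq a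
      unfold pvMarkStep
      split
      · exact foldl_untouched false n (fun u j => u.set j false)
          (fun w j s hnj hsn => getD_set_ne _ _ _ (by omega)) _ w2
          (fun j hj => by
            rw [List.mem_range'] at hj
            obtain ⟨t, _, rfl⟩ := hj
            omega) s hs
      · rfl
  intro s hs
  rw [hextra _ _ (fun i hi => by rw [List.mem_range'_1] at hi; omega) s hs]
  exact hagree s hs

-- ---- sieve prefix property ----

theorem sieve_split (n L : Nat) (h2 : 2 ≤ n) (hnL : n ≤ L) :
    ∃ Q, sieve L = sieve n ++ Q ∧ ∀ q ∈ Q, n < q := by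
  have hm := mark_agree n L h2 hnL
  unfold sieve
  rw [if_neg (by omega), if_neg (by omega)]
  have hsplit : List.range' 2 (L - 1) =
      List.range' 2 (n - 1) ++ List.range' (n + 1) (L - n) := by
    have := List.range'_append (s := 2) (m := n - 1) (n := L - n) (step := 1)
    simp only [one_mul] at this
    rw [show 2 + (n - 1) = n + 1 by omega, show n - 1 + (L - n) = L - 1 by omega] at this
    exact this.symm
  rw [hsplit, List.filter_append]
  refine ⟨(List.range' (n + 1) (L - n)).filter (fun i => (sieveMark L).getD i false), ?_, ?_⟩
  · congr 1
    exact (List.filter_congr (fun i hi => by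
      rw [List.mem_range'_1] at hi
      rw [hm i (by omega)])).symm
  · intro q hq
    have := List.mem_of_mem_filter hq
    rw [List.mem_range'_1] at this
    omega

-- ---- DP stability ----

theorem dpStep_length (limit : Nat) (w : List Int) (p : Nat) :
    (dpStep limit w p).length = w.length := by
  unfold dpStep
  exact foldl_length _ (fun w j => List.length_set) _ w

theorem dpStep_untouched (L : Nat) (n : Nat) (w : List Int) (q : Nat) (hq : n < q) :
    ∀ s, s ≤ n → (dpStep L w q).getD s 0 = w.getD s 0 := by
  intro s hs
  unfold dpStep
  exact foldl_untouched 0 n _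
    (fun w j s hnj hsn => getD_set_ne _ _ _ (by omega)) _ w
    (fun j hj => by
      rw [List.mem_range'] at hj
      obtain ⟨t, _, rfl⟩ := hj
      omega) s hs

theorem dpStep_agree (n L : Nat) (hnL : n ≤ L) (p : Nat) (hp : p ≤ n)
    (w1 w2 : List Int) (h1 : n < w1.length) (h2 : n < w2.length)
    (h : Agree n 0 w1 w2) : Agree n 0 (dpStep n w1 p) (dpStep L w2 p) := by
  unfold dpStep
  have hsplit : List.range' p (L + 1 - p) =
      List.range' p (n + 1 - p) ++ List.range' (n + 1) (L - n) := by
    have := List.range'_append (s := p) (m := n + 1 - p) (n := L - n) (step := 1)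
    simp only [one_mul] at this
    rw [show p + (n + 1 - p) = n + 1 by omega,
      show n + 1 - p + (L - n) = L + 1 - p by omega] at this
    exact this.symm
  rw [hsplit, List.foldl_append]
  have hpar := foldl_parallel 0 n
    (fun a s => a.set s (a.getD s 0 + a.getD (s - p) 0))
    (fun w j => List.length_set)
    (fun u1 u2 j hj hu1 hu2 hu => by
      intro s hs
      by_cases hsj : s = j
      · subst hsj
        rw [getD_set_self _ _ _ _ (by omega), getD_set_self _ _ _ _ (by omega),
          hu s hs, hu (s - p) (by omega)]
      · rw [getD_set_ne _ _ _ (fun e => hsj e.symm), getD_set_ne _ _ _ (fun e => hsj e.symm)]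
        exact hu s hs)
    (List.range' p (n + 1 - p)) w1 w2
    (fun j hj => by rw [List.mem_range'_1] at hj; omega) h1 h2 h
  intro s hs
  have hext := foldl_untouched 0 n
    (fun a s => a.set s (a.getD s 0 + a.getD (s - p) 0))
    (fun w j s' hnj hsn => getD_set_ne _ _ _ (by omega))
    (List.range' (n + 1) (L - n))
    (List.foldl (fun a s => a.set s (a.getD s 0 + a.getD (s - p) 0)) w2
      (List.range' p (n + 1 - p)))
    (fun j hj => by rw [List.mem_range'_1] at hj; omega) s hs
  rw [hext]
  exact hpar s hs

theorem dp_stab (k L : Nat) (h2 : 2 ≤ k) (hkL : k ≤ L) :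
    (dpAll L (sieve L)).getD k 0 = pvW k := by
  obtain ⟨Q, hQ, hQgt⟩ := sieve_split k L h2 hkL
  rw [hQ]
  unfold pvW dpAll
  rw [List.foldl_append]
  -- initial arrays agree up to k
  have hinit : Agree k 0 ((List.replicate (k + 1) (0 : Int)).set 0 1)
      ((List.replicate (L + 1) (0 : Int)).set 0 1) := by
    intro s hs
    rw [dp_init_getD k s hs, dp_init_getD L s (by omega)]
  -- parallel fold over the common primes
  have hpar : ∀ (P : List Nat) (w1 w2 : List Int), (∀ p ∈ P, p ≤ k) →
      w1.length = k + 1 → w2.length = L + 1 → Agree k 0 w1 w2 →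
      Agree k 0 (P.foldl (dpStep k) w1) (P.foldl (dpStep L) w2) := by
    intro P
    induction P with
    | nil => intro w1 w2 _ _ _ h; exact h
    | cons a P ih =>
      intro w1 w2 hP e1 e2 h
      rw [List.foldl_cons, List.foldl_cons]
      exact ih _ _ (fun p hp => hP p (by simp [hp]))
        (by rw [dpStep_length, e1]) (by rw [dpStep_length, e2])
        (dpStep_agree k L hkL a (hP a (by simp)) w1 w2 (by omega) (by omega) h)
  have hagree := hpar (sieve k) _ _ (fun p hp => mem_sieve_le k p hp)
    (by simp) (by simp) hinit
  -- the primes above k never touch indices ≤ k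
  have hrest : ∀ (Q' : List Nat) (w : List Int), (∀ q ∈ Q', k < q) →
      ∀ s, s ≤ k → (Q'.foldl (dpStep L) w).getD s 0 = w.getD s 0 := by
    intro Q'
    induction Q' with
    | nil => intro w _ s _; rfl
    | cons a Q' ih =>
      intro w hQ' s hs
      rw [List.foldl_cons, ih _ (fun q hq => hQ' q (by simp [hq])) s hs,
        dpStep_untouched L k w a (hQ' a (by simp)) s hs]
  rw [hrest Q _ hQgt k le_rfl]
  exact (hagree k le_rfl).symm

-- ---- the two search loops compute "first n in [2, 131072] with pvW n > threshold" ----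

theorem dpA_getD (n : Nat) : (dpAllA n (sieveA n)).getD n 0 = pvW n := by
  rw [arr_getD, toList_dpAll, sieveA_eq]
  rfl

theorem go_eq (t : Int) : ∀ (fuel n : Nat),
    euler77go t fuel n =
      (match (List.range' n fuel).find? (fun k => decide (pvW k > t)) with
        | some k => (k : Int) | none => 0) := by
  intro fuel
  induction fuel with
  | zero => intro n; rfl
  | succ fuel ih =>
    intro n
    rw [List.range'_succ, List.find?_cons]
    show (if (dpAllA n (sieveA n)).getD n 0 > t then (n : Int) else euler77go t fuel (n + 1)) = _
    rw [dpA_getD]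
    by_cases h : pvW n > t
    · simp only [h, if_pos, decide_true]
    · simp only [h, if_neg, not_false_iff, decide_false]
      exact ih (n + 1)

theorem scan_eq (t : Int) (limit : Nat) (h2 : 2 ≤ limit) :
    altScan t limit (rowsAll limit (primesTD limit)) =
      (List.range' 2 (limit - 1)).find? (fun k => decide (pvW k > t)) := by
  unfold altScan
  rw [← sieve_eq_primesTD limit h2,
    rowsAll_eq_dpAll limit (sieve limit)
      (fun p hp => ⟨mem_sieve_two_le limit p hp, mem_sieve_le limit p hp⟩)]
  exact find?_congr_mem _ _ _ (fun k hk => by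
    rw [List.mem_range'_1] at hk
    rw [dp_stab k limit (by omega) (by omega)])

theorem range_prefix (limit M : Nat) (h2 : 2 ≤ limit) (hM : limit ≤ M) :
    List.range' 2 (M - 1) =
      List.range' 2 (limit - 1) ++ List.range' (limit + 1) (M - limit) := by
  have := List.range'_append (s := 2) (m := limit - 1) (n := M - limit) (step := 1)
  simp only [one_mul] at this
  rw [show 2 + (limit - 1) = limit + 1 by omega,
    show limit - 1 + (M - limit) = M - 1 by omega] at this
  exact this.symm

theorem altgo_eq (t : Int) : ∀ (fuel limit : Nat), 2 ≤ limit →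
    altGo t (fuel + 1) limit =
      (match (List.range' 2 (limit * 2 ^ fuel - 1)).find? (fun k => decide (pvW k > t)) with
        | some k => (k : Int) | none => 0) := by
  intro fuel
  induction fuel with
  | zero =>
    intro limit h2
    show (match altScan t limit (rowsAll limit (primesTD limit)) with
      | some k => (k : Int) | none => altGo t 0 (limit * 2)) = _
    rw [scan_eq t limit h2]
    simp only [pow_zero, mul_one]
    cases (List.range' 2 (limit - 1)).find? (fun k => decide (pvW k > t)) <;> rfl
  | succ fuel ih =>
    intro limit h2
    have hM : limit ≤ limit * 2 ^ (fuel + 1) :=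
      Nat.le_mul_of_pos_right limit (Nat.two_pow_pos _)
    rw [show altGo t (fuel + 1 + 1) limit =
      (match altScan t limit (rowsAll limit (primesTD limit)) with
        | some k => (k : Int) | none => altGo t (fuel + 1) (limit * 2)) from rfl]
    rw [scan_eq t limit h2,
      range_prefix limit (limit * 2 ^ (fuel + 1)) h2 hM, List.find?_append]
    cases hfind : (List.range' 2 (limit - 1)).find? (fun k => decide (pvW k > t)) with
    | some k => rfl
    | none =>
      simp only [Option.none_or]
      have hM2 : limit ≤ limit * 2 * 2 ^ fuel := by
        calc limit ≤ limit * (2 * 2 ^ fuel) :=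
              Nat.le_mul_of_pos_right limit (by positivity)
          _ = limit * 2 * 2 ^ fuel := (mul_assoc _ _ _).symm
      rw [ih (limit * 2) (by omega),
        range_prefix limit (limit * 2 * 2 ^ fuel) h2 hM2,
        List.find?_append, hfind, Option.none_or]
      have : limit * 2 * 2 ^ fuel = limit * 2 ^ (fuel + 1) := by ring
      rw [this]

-- ===== VERDICT (by name: the statement is the Claim_ definition above) =====
theorem euler_77_spec : Claim_equal_euler_77 := by
  intro t _
  unfold Spec_euler_77 euler_77 euler_77_alt
  rw [go_eq t 131071 2, altgo_eq t 16 2 (by norm_num)]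
  norm_num
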